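-- pv_equiv track=rewrite | github.com/Kanakasrivaishnavi/Gsoc-project | src/ols_fetch_from_github/github_file_updater.py | _compare_term_fields
-- ===== SOURCE A (Python) =====
-- def _compare_term_fields(old_term, new_term):
--     """
--     Compare field changes of a single term or typedef
--
--     Description:
--         Performs detailed field-by-field comparison of a single term or typedef,
--         identifying which specific fields were added, deleted, or modified.
--
--     Input:
--         old_term (dict): Term/typedef dictionary from old version
--         new_term (dict): Term/typedef dictionary from new version
--
--     Output:
--         dict: Field changes with field names as keys and change details as values
--     """
--     changes = {}
--
--     # Get all fields
--     all_fields = set(old_term.keys()) | set(new_term.keys())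
--
--     for field in all_fields:
--         old_value = old_term.get(field)
--         new_value = new_term.get(field)
--
--         if old_value != new_value:
--             if field not in old_term:
--                 changes[field] = {'action': 'added', 'new_value': new_value}
--             elif field not in new_term:
--                 changes[field] = {'action': 'deleted', 'old_value': old_value}
--             else:
--                 changes[field] = {'action': 'updated', 'old_value': old_value, 'new_value': new_value}
--
--     return changes
-- ===== SOURCE B (Python) =====
-- def _compare_term_fields(old_term, new_term):
--     changes = {}
--     for field, old_value in old_term.items():
--         if field in new_term:
--             new_value = new_term[field]
--             if old_value != new_value:
--                 changes[field] = {'action': 'updated', 'old_value': old_value, 'new_value': new_value}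
--         else:
--             changes[field] = {'action': 'deleted', 'old_value': old_value}
--     for field, new_value in new_term.items():
--         if field not in old_term:
--             changes[field] = {'action': 'added', 'new_value': new_value}
--     return changes
-- ===== Notes on version B (the rewrite author's own statement) =====
-- stated objective: simpler
-- what changed: B drops A's union-of-keys set and single loop with three-way membership branching over None-defaulted .get lookups, and instead makes two direct passes: one over old_term emitting deleted/updated entries and one over new_term emitting added entries.
import Mathlib
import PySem

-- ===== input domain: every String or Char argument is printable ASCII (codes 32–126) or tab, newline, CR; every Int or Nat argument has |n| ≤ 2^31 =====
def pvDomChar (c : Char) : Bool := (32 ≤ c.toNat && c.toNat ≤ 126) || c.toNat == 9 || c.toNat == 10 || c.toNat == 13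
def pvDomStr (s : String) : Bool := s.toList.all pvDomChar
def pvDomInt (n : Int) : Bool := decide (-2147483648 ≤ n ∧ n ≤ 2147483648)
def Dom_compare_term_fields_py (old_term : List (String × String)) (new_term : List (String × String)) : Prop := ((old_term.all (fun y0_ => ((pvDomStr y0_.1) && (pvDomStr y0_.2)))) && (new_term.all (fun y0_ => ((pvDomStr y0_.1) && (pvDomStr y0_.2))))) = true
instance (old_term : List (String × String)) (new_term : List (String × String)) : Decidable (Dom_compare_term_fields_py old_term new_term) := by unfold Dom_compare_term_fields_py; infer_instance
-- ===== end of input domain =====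

-- B replaces A's single loop over the union-of-keys set (with three-way membership branching and
-- None-defaulted .get lookups) by two direct passes: one over old_term emitting deleted/updated,
-- one over new_term emitting added.  Objective: simpler; same O(n+m) cost.
-- (Python iterates `all_fields`, a set, in hash order; the returned dict is compared as a dict,
--  i.e. order-insensitively, and the port models the iteration in first-insertion order.
--  The `.getD ""` coercions mark branches where the Python Option value is necessarily `some`.)

-- ===== PORT A =====
def compare_term_fields_py (old_term : List (String × String)) (new_term : List (String × String)) : List (String × List (String × String)) :=
  let all_fields : PySem.Set String :=
    PySem.Set.union (PySem.Set.ofList (old_term.map Prod.fst)) (new_term.map Prod.fst)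
  let changes : PySem.Dict String (List (String × String)) :=
    all_fields.foldl (fun changes field =>
      let old_value := PySem.Dict.get? (PySem.Dict.mk old_term) field
      let new_value := PySem.Dict.get? (PySem.Dict.mk new_term) field
      if old_value ≠ new_value then
        if ¬ (PySem.Dict.contains (PySem.Dict.mk old_term) field = true) then
          changes.insert field [("action", "added"), ("new_value", new_value.getD "")]
        else if ¬ (PySem.Dict.contains (PySem.Dict.mk new_term) field = true) then
          changes.insert field [("action", "deleted"), ("old_value", old_value.getD "")]
        else
          changes.insert field [("action", "updated"), ("old_value", old_value.getD ""), ("new_value", new_value.getD "")]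
      else changes) PySem.Dict.empty
  changes.items

-- ===== PORT B =====
def compare_term_fields_py_alt (old_term : List (String × String)) (new_term : List (String × String)) : List (String × List (String × String)) :=
  let changes1 : PySem.Dict String (List (String × String)) :=
    old_term.foldl (fun changes p =>
      match PySem.Dict.get? (PySem.Dict.mk new_term) p.1 with
      | some new_value =>
          if p.2 ≠ new_value then
            changes.insert p.1 [("action", "updated"), ("old_value", p.2), ("new_value", new_value)]
          else changes
      | none =>
          changes.insert p.1 [("action", "deleted"), ("old_value", p.2)]) PySem.Dict.empty
  let changes2 :=
    new_term.foldl (fun changes p =>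
      if PySem.Dict.contains (PySem.Dict.mk old_term) p.1 then changes
      else changes.insert p.1 [("action", "added"), ("new_value", p.2)]) changes1
  changes2.items

-- ===== PRECONDITION & SPEC =====
-- Pre_ excludes association lists with duplicate keys: the Python function takes dicts, which
-- cannot contain duplicate keys, so such lists correspond to no input A accepts.
def Pre_compare_term_fields_py (old_term : List (String × String)) (new_term : List (String × String)) : Prop :=
  (old_term.map Prod.fst).Nodup ∧ (new_term.map Prod.fst).Nodup
instance (old_term : List (String × String)) (new_term : List (String × String)) : Decidable (Pre_compare_term_fields_py old_term new_term) := by unfold Pre_compare_term_fields_py; infer_instance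
def pvWitness_compare_term_fields_py : (List (String × String)) × (List (String × String)) :=
  ([("id", "T1"), ("name", "old")], [("id", "T1"), ("name", "new"), ("def", "x")])

def Spec_compare_term_fields_py (old_term : List (String × String)) (new_term : List (String × String)) (out : List (String × List (String × String))) : Prop := out = compare_term_fields_py_alt old_term new_term
instance (old_term : List (String × String)) (new_term : List (String × String)) (out : List (String × List (String × String))) : Decidable (Spec_compare_term_fields_py old_term new_term out) := by unfold Spec_compare_term_fields_py; infer_instance

-- ===== CLAIM (what is proved, stated in full; the proofs are below) =====
def Claim_equal_compare_term_fields_py : Prop := ∀ (old_term : List (String × String)) (new_term : List (String × String)), Dom_compare_term_fields_py old_term new_term → Pre_compare_term_fields_py old_term new_term → Spec_compare_term_fields_py old_term new_term (compare_term_fields_py old_term new_term)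

-- ===== LEMMAS AND PROOFS =====

def pvDetail (o n : List (String × String)) (f : String) : List (String × String) :=
  if ¬ (PySem.Dict.contains (PySem.Dict.mk o) f = true) then
    [("action", "added"), ("new_value", (PySem.Dict.get? (PySem.Dict.mk n) f).getD "")]
  else if ¬ (PySem.Dict.contains (PySem.Dict.mk n) f = true) then
    [("action", "deleted"), ("old_value", (PySem.Dict.get? (PySem.Dict.mk o) f).getD "")]
  else
    [("action", "updated"), ("old_value", (PySem.Dict.get? (PySem.Dict.mk o) f).getD ""), ("new_value", (PySem.Dict.get? (PySem.Dict.mk n) f).getD "")]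

theorem pvA_fold (o n : List (String × String)) (fs : List String)
    (d : PySem.Dict String (List (String × String)))
    (hnd : fs.Nodup) (hfresh : ∀ f ∈ fs, d.contains f = false) :
    (fs.foldl (fun changes field =>
      let old_value := PySem.Dict.get? (PySem.Dict.mk o) field
      let new_value := PySem.Dict.get? (PySem.Dict.mk n) field
      if old_value ≠ new_value then
        if ¬ (PySem.Dict.contains (PySem.Dict.mk o) field = true) then
          changes.insert field [("action", "added"), ("new_value", new_value.getD "")]
        else if ¬ (PySem.Dict.contains (PySem.Dict.mk n) field = true) then
          changes.insert field [("action", "deleted"), ("old_value", old_value.getD "")]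
        else
          changes.insert field [("action", "updated"), ("old_value", old_value.getD ""), ("new_value", new_value.getD "")]
      else changes) d).items
    = d.items ++ (fs.filter (fun f => PySem.Dict.get? (PySem.Dict.mk o) f ≠ PySem.Dict.get? (PySem.Dict.mk n) f)).map
        (fun f => (f, pvDetail o n f)) := by
  induction fs generalizing d with
  | nil => simp
  | cons f t ih =>
    simp only [List.nodup_cons] at hnd
    obtain ⟨hf, hnd⟩ := hnd
    have hdf : d.contains f = false := hfresh f (List.mem_cons_self ..)
    have hstep : (let old_value := PySem.Dict.get? (PySem.Dict.mk o) f
      let new_value := PySem.Dict.get? (PySem.Dict.mk n) f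
      if old_value ≠ new_value then
        if ¬ (PySem.Dict.contains (PySem.Dict.mk o) f = true) then
          d.insert f [("action", "added"), ("new_value", new_value.getD "")]
        else if ¬ (PySem.Dict.contains (PySem.Dict.mk n) f = true) then
          d.insert f [("action", "deleted"), ("old_value", old_value.getD "")]
        else
          d.insert f [("action", "updated"), ("old_value", old_value.getD ""), ("new_value", new_value.getD "")]
      else d)
      = if PySem.Dict.get? (PySem.Dict.mk o) f ≠ PySem.Dict.get? (PySem.Dict.mk n) f
        then d.insert f (pvDetail o n f) else d := by
      simp only [pvDetail]; split_ifs <;> rfl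
    rw [List.foldl_cons, hstep, List.filter_cons]
    by_cases hc : PySem.Dict.get? (PySem.Dict.mk o) f ≠ PySem.Dict.get? (PySem.Dict.mk n) f
    · rw [if_pos hc, ih _ hnd, PySem.Dict.items_insert_of_not_contains _ _ hdf]
      · simp [hc]
      · intro g hg
        rw [PySem.Dict.contains_insert]
        have : g ≠ f := fun h => hf (h ▸ hg)
        simp [this, hfresh g (List.mem_cons_of_mem _ hg)]
    · rw [if_neg hc, ih _ hnd (fun g hg => hfresh g (List.mem_cons_of_mem _ hg))]
      simp [hc]

theorem pvB1_fold (n : List (String × String)) (l : List (String × String))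
    (d : PySem.Dict String (List (String × String)))
    (hnd : (l.map Prod.fst).Nodup) (hfresh : ∀ p ∈ l, d.contains p.1 = false) :
    (l.foldl (fun changes p =>
      match PySem.Dict.get? (PySem.Dict.mk n) p.1 with
      | some new_value =>
          if p.2 ≠ new_value then
            changes.insert p.1 [("action", "updated"), ("old_value", p.2), ("new_value", new_value)]
          else changes
      | none =>
          changes.insert p.1 [("action", "deleted"), ("old_value", p.2)]) d).items
    = d.items ++ l.flatMap (fun p =>
      match PySem.Dict.get? (PySem.Dict.mk n) p.1 with
      | some new_value =>
          if p.2 ≠ new_value then [(p.1, [("action", "updated"), ("old_value", p.2), ("new_value", new_value)])] else []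
      | none => [(p.1, [("action", "deleted"), ("old_value", p.2)])]) := by
  induction l generalizing d with
  | nil => simp
  | cons p t ih =>
    simp only [List.map_cons, List.nodup_cons] at hnd
    obtain ⟨hf, hnd⟩ := hnd
    have hdp : d.contains p.1 = false := hfresh p (List.mem_cons_self ..)
    rw [List.foldl_cons, List.flatMap_cons]
    cases hg : PySem.Dict.get? (PySem.Dict.mk n) p.1 with
    | none =>
      rw [ih _ hnd, PySem.Dict.items_insert_of_not_contains _ _ hdp]
      · simp
      · intro q hq
        rw [PySem.Dict.contains_insert]
        have : q.1 ≠ p.1 := fun h => hf (h ▸ List.mem_map_of_mem hq)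
        simp [this, hfresh q (List.mem_cons_of_mem _ hq)]
    | some nv =>
      simp only []
      by_cases hne : p.2 ≠ nv
      · rw [if_pos hne, if_pos hne, ih _ hnd, PySem.Dict.items_insert_of_not_contains _ _ hdp]
        · simp
        · intro q hq
          rw [PySem.Dict.contains_insert]
          have : q.1 ≠ p.1 := fun h => hf (h ▸ List.mem_map_of_mem hq)
          simp [this, hfresh q (List.mem_cons_of_mem _ hq)]
      · rw [if_neg hne, if_neg hne, ih _ hnd (fun q hq => hfresh q (List.mem_cons_of_mem _ hq))]
        simp

theorem pvB1_contains (n : List (String × String)) (l : List (String × String))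
    (d : PySem.Dict String (List (String × String))) (f : String)
    (hd : d.contains f = false) (hnf : f ∉ l.map Prod.fst) :
    (l.foldl (fun changes p =>
      match PySem.Dict.get? (PySem.Dict.mk n) p.1 with
      | some new_value =>
          if p.2 ≠ new_value then
            changes.insert p.1 [("action", "updated"), ("old_value", p.2), ("new_value", new_value)]
          else changes
      | none =>
          changes.insert p.1 [("action", "deleted"), ("old_value", p.2)]) d).contains f = false := by
  induction l generalizing d with
  | nil => simpa using hd
  | cons p t ih =>
    simp only [List.map_cons, List.mem_cons, not_or] at hnf
    obtain ⟨hfp, hnf⟩ := hnf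
    rw [List.foldl_cons]
    cases hg : PySem.Dict.get? (PySem.Dict.mk n) p.1 with
    | none =>
      simp only []
      exact ih _ (by rw [PySem.Dict.contains_insert]; simp [hfp, hd]) hnf
    | some nv =>
      simp only []
      by_cases hne : p.2 ≠ nv
      · rw [if_pos hne]
        exact ih _ (by rw [PySem.Dict.contains_insert]; simp [hfp, hd]) hnf
      · rw [if_neg hne]; exact ih _ hd hnf

theorem pvB2_fold (o : List (String × String)) (l : List (String × String))
    (d : PySem.Dict String (List (String × String)))
    (hnd : (l.map Prod.fst).Nodup)
    (hfresh : ∀ p ∈ l, PySem.Dict.contains (PySem.Dict.mk o) p.1 = false → d.contains p.1 = false) :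
    (l.foldl (fun changes p =>
      if PySem.Dict.contains (PySem.Dict.mk o) p.1 then changes
      else changes.insert p.1 [("action", "added"), ("new_value", p.2)]) d).items
    = d.items ++ (l.filter (fun p => !(PySem.Dict.contains (PySem.Dict.mk o) p.1))).map
        (fun p => (p.1, [("action", "added"), ("new_value", p.2)])) := by
  induction l generalizing d with
  | nil => simp
  | cons p t ih =>
    simp only [List.map_cons, List.nodup_cons] at hnd
    obtain ⟨hf, hnd⟩ := hnd
    rw [List.foldl_cons, List.filter_cons]
    by_cases hc : PySem.Dict.contains (PySem.Dict.mk o) p.1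
    · rw [if_pos hc, ih _ hnd (fun q hq => hfresh q (List.mem_cons_of_mem _ hq))]
      simp [hc]
    · rw [if_neg hc]
      have hdp : d.contains p.1 = false :=
        hfresh p (List.mem_cons_self ..) (Bool.not_eq_true _ ▸ eq_false_of_ne_true hc)
      rw [ih _ hnd, PySem.Dict.items_insert_of_not_contains _ _ hdp]
      · simp [hc]
      · intro q hq hqo
        rw [PySem.Dict.contains_insert]
        have : q.1 ≠ p.1 := fun h => hf (h ▸ List.mem_map_of_mem hq)
        simp [this, hfresh q (List.mem_cons_of_mem _ hq) hqo]

theorem pvC1 (o n : List (String × String)) (l : List (String × String))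
    (ho : ∀ p ∈ l, PySem.Dict.get? (PySem.Dict.mk o) p.1 = some p.2) :
    ((l.map Prod.fst).filter (fun f => PySem.Dict.get? (PySem.Dict.mk o) f ≠ PySem.Dict.get? (PySem.Dict.mk n) f)).map
        (fun f => (f, pvDetail o n f))
    = l.flatMap (fun p =>
      match PySem.Dict.get? (PySem.Dict.mk n) p.1 with
      | some new_value =>
          if p.2 ≠ new_value then [(p.1, [("action", "updated"), ("old_value", p.2), ("new_value", new_value)])] else []
      | none => [(p.1, [("action", "deleted"), ("old_value", p.2)])]) := by
  induction l with
  | nil => simp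
  | cons p t ih =>
    have hp := ho p (List.mem_cons_self ..)
    have hco : PySem.Dict.contains (PySem.Dict.mk o) p.1 = true := by
      rw [PySem.Dict.contains_eq_isSome_get?, hp]; rfl
    rw [List.map_cons, List.filter_cons, List.flatMap_cons,
        ← ih (fun q hq => ho q (List.mem_cons_of_mem _ hq))]
    have hco' : (o.any fun q => q.1 == p.1) = true := by simpa using hco
    cases hgn : PySem.Dict.get? (PySem.Dict.mk n) p.1 with
    | none =>
      have hcn : PySem.Dict.contains (PySem.Dict.mk n) p.1 = false := by
        rw [PySem.Dict.contains_eq_isSome_get?, hgn]; rfl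
      have hcn' : (n.any fun q => q.1 == p.1) = false := by simpa using hcn
      simp [hp, pvDetail, hco', hcn']
    | some nv =>
      have hcn : PySem.Dict.contains (PySem.Dict.mk n) p.1 = true := by
        rw [PySem.Dict.contains_eq_isSome_get?, hgn]; rfl
      have hcn' : (n.any fun q => q.1 == p.1) = true := by simpa using hcn
      by_cases hne : p.2 = nv
      · simp [hp, hne]
      · simp [hp, hgn, hne, pvDetail, hco', hcn']


theorem pvC2 (o n : List (String × String)) (l : List (String × String))
    (hn : ∀ p ∈ l, PySem.Dict.get? (PySem.Dict.mk n) p.1 = some p.2) :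
    (((l.map Prod.fst).filter (fun f => !(PySem.Set.contains (o.map Prod.fst) f))).filter
        (fun f => PySem.Dict.get? (PySem.Dict.mk o) f ≠ PySem.Dict.get? (PySem.Dict.mk n) f)).map
        (fun f => (f, pvDetail o n f))
    = (l.filter (fun p => !(PySem.Dict.contains (PySem.Dict.mk o) p.1))).map
        (fun p => (p.1, [("action", "added"), ("new_value", p.2)])) := by
  induction l with
  | nil => simp
  | cons p t ih =>
    have hp := hn p (List.mem_cons_self ..)
    have ih' := ih (fun q hq => hn q (List.mem_cons_of_mem _ hq))
    by_cases hc : PySem.Dict.contains (PySem.Dict.mk o) p.1 = true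
    · have hc' : (o.any fun q => q.1 == p.1) = true := by simpa using hc
      have hmem : p.1 ∈ o.map Prod.fst := by
        have h2 := hc'
        simp only [List.any_eq_true, beq_iff_eq] at h2
        obtain ⟨q, hq, he⟩ := h2
        exact he ▸ List.mem_map_of_mem hq
      have hset : PySem.Set.contains (o.map Prod.fst) p.1 = true := by
        simpa [PySem.Set.contains_iff] using hmem
      simp only [List.map_cons, List.filter_cons, hset, hc', Bool.not_true, Bool.false_eq_true,
        if_false, PySem.Dict.contains_mk]
      exact ih'
    · have hcf : PySem.Dict.contains (PySem.Dict.mk o) p.1 = false := eq_false_of_ne_true hc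
      have hcf' : (o.any fun q => q.1 == p.1) = false := by
        have h2 := hcf; rwa [PySem.Dict.contains_mk] at h2
      have hmem : p.1 ∉ o.map Prod.fst := by
        intro h
        obtain ⟨q, hq, he⟩ := List.mem_map.mp h
        have h2 : (o.any fun r => r.1 == p.1) = true :=
          List.any_eq_true.mpr ⟨q, hq, by simpa using he⟩
        rw [hcf'] at h2; exact Bool.false_ne_true h2
      have hgo : PySem.Dict.get? (PySem.Dict.mk o) p.1 = none := by
        cases hg : PySem.Dict.get? (PySem.Dict.mk o) p.1 with
        | none => rfl
        | some v => rw [PySem.Dict.contains_eq_isSome_get?, hg] at hcf; simp at hcf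
      have hset : PySem.Set.contains (o.map Prod.fst) p.1 = false := by
        simp [hmem]
      simp only [List.map_cons, List.filter_cons, hset, hcf', Bool.not_false, if_true,
        PySem.Dict.contains_mk, hgo, hp, ne_eq, reduceCtorEq, not_false_eq_true, decide_true]
      rw [ih']
      congr 1
      simp [pvDetail, hcf', hp]

theorem pvMain (o n : List (String × String))
    (ho : (o.map Prod.fst).Nodup) (hn : (n.map Prod.fst).Nodup) :
    compare_term_fields_py o n = compare_term_fields_py_alt o n := by
  have hall : PySem.Set.union (PySem.Set.ofList (o.map Prod.fst)) (n.map Prod.fst)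
      = (o.map Prod.fst) ++ (n.map Prod.fst).filter (fun f => !(PySem.Set.contains (o.map Prod.fst) f)) := by
    rw [show PySem.Set.union (PySem.Set.ofList (o.map Prod.fst)) (n.map Prod.fst)
          = PySem.Set.update (PySem.Set.ofList (o.map Prod.fst)) (n.map Prod.fst) from rfl,
        PySem.Set.update_eq_append_filter,
        PySem.Set.ofList_eq_self_of_nodup _ ho, PySem.Set.ofList_eq_self_of_nodup _ hn]
  have hdisj : (o.map Prod.fst).Disjoint
      ((n.map Prod.fst).filter (fun f => !(PySem.Set.contains (o.map Prod.fst) f))) := by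
    intro f hfo hff
    have := List.of_mem_filter hff
    rw [Bool.not_eq_eq_eq_not, Bool.not_true] at this
    exact (Bool.false_ne_true ((PySem.Set.contains_iff _ _).mpr hfo ▸ this).symm)
  have hnodall : ((o.map Prod.fst) ++ (n.map Prod.fst).filter
      (fun f => !(PySem.Set.contains (o.map Prod.fst) f))).Nodup :=
    List.nodup_append.mpr ⟨ho, hn.filter _, fun a ha b hb h => hdisj ha (h ▸ hb)⟩
  have hgo : ∀ p ∈ o, PySem.Dict.get? (PySem.Dict.mk o) p.1 = some p.2 := by
    intro p hp
    exact PySem.Dict.get?_of_mem_items _ (by exact hp) (by simpa [PySem.Dict.keys] using ho)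
  have hgn : ∀ p ∈ n, PySem.Dict.get? (PySem.Dict.mk n) p.1 = some p.2 := by
    intro p hp
    exact PySem.Dict.get?_of_mem_items _ (by exact hp) (by simpa [PySem.Dict.keys] using hn)
  simp only [compare_term_fields_py, compare_term_fields_py_alt]
  rw [hall, pvA_fold o n _ PySem.Dict.empty hnodall
        (fun f _ => by simp [PySem.Dict.contains_empty]),
      List.filter_append, List.map_append,
      pvB2_fold o n _ hn (fun p hp hpc => by
        apply pvB1_contains n o PySem.Dict.empty p.1 (by simp [PySem.Dict.contains_empty])
        intro hmem
        obtain ⟨q, hq, he⟩ := List.mem_map.mp hmem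
        have h2 : (o.any fun r => r.1 == p.1) = true :=
          List.any_eq_true.mpr ⟨q, hq, by simpa using he⟩
        rw [PySem.Dict.contains_mk] at hpc
        rw [hpc] at h2
        exact Bool.false_ne_true h2),
      pvB1_fold n o PySem.Dict.empty ho (fun p _ => by simp [PySem.Dict.contains_empty]),
      pvC1 o n o hgo, pvC2 o n n hgn]
  simp

-- ===== VERDICT (by name: the statement is the Claim_ definition above) =====
theorem compare_term_fields_py_spec : Claim_equal_compare_term_fields_py := by
  intro old_term new_term _ hpre
  unfold Spec_compare_term_fields_py
  exact pvMain old_term new_term hpre.1 hpre.2
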